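-- pv_equiv track=rewrite | github.com/luuxifer/Intro_to_AI | Assignment 1/dfs.py | get_valid_numbers_in_row
-- ===== SOURCE A (Python) =====
-- def get_valid_numbers_in_row(board, row, col):
--     valid_numbers = {1, 2, 3, 4, 5, 6, 7, 8, 9}
--     for idx, val in enumerate(board[row]):
--         if idx == col:
--             continue
--         else:
--             if val in valid_numbers:
--                 valid_numbers.remove(val)
--     return valid_numbers
-- ===== SOURCE B (Python) =====
-- def get_valid_numbers_in_row(board, row, col):
--     r = board[row]
--     return {n for n in range(1, 10)
--             if all(v != n for i, v in enumerate(r) if i != col)}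
-- ===== Notes on version B (the rewrite author's own statement) =====
-- stated objective: alternative
-- what changed: Instead of mutating the universe set {1..9} by removing each row value, B tests each candidate 1..9 for absence in the row (excluding index col) with a set comprehension.
import Mathlib
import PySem

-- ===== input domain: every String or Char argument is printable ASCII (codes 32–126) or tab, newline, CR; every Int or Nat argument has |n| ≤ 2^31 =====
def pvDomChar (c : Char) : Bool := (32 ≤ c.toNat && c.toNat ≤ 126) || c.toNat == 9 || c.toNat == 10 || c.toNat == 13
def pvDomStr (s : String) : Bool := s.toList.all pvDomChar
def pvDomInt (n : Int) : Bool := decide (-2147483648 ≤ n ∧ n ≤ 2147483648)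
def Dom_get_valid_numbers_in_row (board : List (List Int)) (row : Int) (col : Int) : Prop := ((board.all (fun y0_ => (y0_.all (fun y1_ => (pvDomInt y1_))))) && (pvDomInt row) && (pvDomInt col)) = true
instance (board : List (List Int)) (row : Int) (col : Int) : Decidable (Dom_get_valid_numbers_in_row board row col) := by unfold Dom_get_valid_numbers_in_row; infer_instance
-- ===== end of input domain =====

-- B inverts the traversal: instead of removing each row value from the universe set {1..9},
-- it keeps each candidate 1..9 that does not occur in the row outside index col (objective: alternative).

-- ===== PORT A =====
def get_valid_numbers_in_row (board : List (List Int)) (row : Int) (col : Int) : List Int :=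
  match PySem.List.pyGet? board row with
  | none => []   -- board[row] raises IndexError; excluded by Pre_
  | some r =>
    (PySem.List.enumerate r).foldl
      (fun valid_numbers p =>
        if p.1 == col then valid_numbers
        else if PySem.Set.contains valid_numbers p.2 then
          PySem.Set.discard valid_numbers p.2
        else valid_numbers)
      (PySem.Set.ofList [1, 2, 3, 4, 5, 6, 7, 8, 9])

-- ===== PORT B =====
def get_valid_numbers_in_row_alt (board : List (List Int)) (row : Int) (col : Int) : List Int :=
  match PySem.List.pyGet? board row with
  | none => []   -- board[row] raises IndexError; excluded by Pre_
  | some r =>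
    PySem.Set.ofList
      ((PySem.List.pyRange 1 10 1).filter
        (fun n => (PySem.List.enumerate r).all (fun p => p.1 == col || !(p.2 == n))))

-- ===== PRECONDITION & SPEC =====
-- Pre_ excludes exactly the inputs where board[row] raises IndexError in Python.
def Pre_get_valid_numbers_in_row (board : List (List Int)) (row : Int) (col : Int) : Prop :=
  PySem.Raise.InRange board.length row
instance (board : List (List Int)) (row : Int) (col : Int) : Decidable (Pre_get_valid_numbers_in_row board row col) := by unfold Pre_get_valid_numbers_in_row; infer_instance

def pvWitness_get_valid_numbers_in_row : List (List Int) × Int × Int := ([[1, 2, 3], [4, 5, 6]], 1, 0)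

def Spec_get_valid_numbers_in_row (board : List (List Int)) (row : Int) (col : Int) (out : List Int) : Prop := out = get_valid_numbers_in_row_alt board row col
instance (board : List (List Int)) (row : Int) (col : Int) (out : List Int) : Decidable (Spec_get_valid_numbers_in_row board row col out) := by unfold Spec_get_valid_numbers_in_row; infer_instance

-- ===== CLAIM (what is proved, stated in full; the proofs are below) =====
def Claim_equal_get_valid_numbers_in_row : Prop := ∀ (board : List (List Int)) (row : Int) (col : Int), Dom_get_valid_numbers_in_row board row col → Pre_get_valid_numbers_in_row board row col → Spec_get_valid_numbers_in_row board row col (get_valid_numbers_in_row board row col)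

-- ===== LEMMAS AND PROOFS =====

-- A's removal loop, started from any state s, computes exactly the filter by absence.
theorem pv_foldl_remove_eq_filter (col : Int) :
    ∀ (l : List (Int × Int)) (s : List Int),
      l.foldl (fun valid_numbers p =>
          if p.1 == col then valid_numbers
          else if PySem.Set.contains valid_numbers p.2 then
            PySem.Set.discard valid_numbers p.2
          else valid_numbers) s
        = s.filter (fun n => l.all (fun p => p.1 == col || !(p.2 == n))) := by
  intro l
  induction l with
  | nil => intro s; simp
  | cons p l ih =>
    intro s
    have hstep : (if p.1 == col then s
        else if PySem.Set.contains s p.2 then PySem.Set.discard s p.2 else s)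
        = s.filter (fun n => p.1 == col || !(p.2 == n)) := by
      cases h1 : (p.1 == col) with
      | true => simp
      | false =>
        simp only [Bool.false_or]
        cases h2 : PySem.Set.contains s p.2 with
        | true =>
          simp only [PySem.Set.discard]
          apply List.filter_congr
          intro a _
          simp [eq_comm]
        | false =>
          have hnm : p.2 ∉ s := by
            intro hm
            have hc := (PySem.Set.contains_iff (s := s) (x := p.2)).mpr hm
            rw [h2] at hc
            exact Bool.noConfusion hc
          symm
          apply List.filter_eq_self.mpr
          intro a ha
          simp only [Bool.not_eq_eq_eq_not, Bool.not_true, beq_eq_false_iff_ne]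
          intro h
          exact hnm (h ▸ ha)
    rw [List.foldl_cons, hstep, ih, List.filter_filter]
    apply List.filter_congr
    intro a _
    simp [List.all_cons, Bool.and_comm]

-- ===== VERDICT (by name: the statement is the Claim_ definition above) =====
theorem get_valid_numbers_in_row_spec : Claim_equal_get_valid_numbers_in_row := by
  intro board row col _ hpre
  unfold Spec_get_valid_numbers_in_row get_valid_numbers_in_row get_valid_numbers_in_row_alt
  obtain ⟨r, hr⟩ : ∃ r, PySem.List.pyGet? board row = some r := by
    cases h : PySem.List.pyGet? board row with
    | none =>
      exact absurd hpre (by unfold Pre_get_valid_numbers_in_row; rw [← PySem.List.pyGet?_eq_none_iff]; exact h)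
    | some r => exact ⟨r, rfl⟩
  have huniv : PySem.Set.ofList ([1, 2, 3, 4, 5, 6, 7, 8, 9] : List Int)
      = [1, 2, 3, 4, 5, 6, 7, 8, 9] := by decide
  have hrange : PySem.List.pyRange 1 10 1 = ([1, 2, 3, 4, 5, 6, 7, 8, 9] : List Int) := by decide
  rw [hr]
  dsimp only
  rw [huniv, hrange, pv_foldl_remove_eq_filter]
  rw [PySem.Set.ofList_eq_self_of_nodup]
  exact List.Nodup.filter _ (by decide)
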